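-- pv_equiv track=rewrite | github.com/Ro022799/octal | conversion_octal.py | conversion_grupos
-- ===== SOURCE A (Python) =====
-- def conversion_grupos(grupos, value_letters):
--         cont_groups = []
--         for codigo in grupos:
--                 cont = 0
--                 for letter in codigo:
--                         for value, lett in value_letters:
--                                 if letter == lett:
--                                         cont += value
--                 cont_groups.append(cont)
--         return cont_groups
-- ===== SOURCE B (Python) =====
-- def conversion_grupos(grupos, value_letters):
--         cont_groups = []
--         for codigo in grupos:
--                 freq = {}
--                 for ch in codigo:
--                         freq[ch] = freq.get(ch, 0) + 1
--                 cont_groups.append(sum(value * freq.get(lett, 0) for value, lett in value_letters))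
--         return cont_groups
-- ===== Notes on version B (the rewrite author's own statement) =====
-- stated objective: alternative
-- what changed: Per group, B builds a letter-frequency table in one pass over the group and then makes a single pass over value_letters accumulating value * freq.get(lett, 0), replacing A's per-letter rescan of value_letters.
import Mathlib
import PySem

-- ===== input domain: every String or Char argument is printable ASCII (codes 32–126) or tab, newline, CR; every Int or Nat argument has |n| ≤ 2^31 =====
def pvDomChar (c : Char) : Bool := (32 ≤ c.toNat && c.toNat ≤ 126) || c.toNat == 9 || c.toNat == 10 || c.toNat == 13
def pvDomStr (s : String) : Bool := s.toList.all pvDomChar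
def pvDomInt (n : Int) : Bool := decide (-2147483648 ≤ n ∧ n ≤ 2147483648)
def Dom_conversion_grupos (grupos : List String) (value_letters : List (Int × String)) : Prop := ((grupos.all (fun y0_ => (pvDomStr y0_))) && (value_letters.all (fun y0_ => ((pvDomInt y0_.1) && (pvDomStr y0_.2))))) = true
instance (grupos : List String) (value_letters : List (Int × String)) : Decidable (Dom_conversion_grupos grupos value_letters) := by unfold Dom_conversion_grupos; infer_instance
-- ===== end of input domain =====

-- B builds a per-group letter-frequency table once, then makes a single pass over
-- value_letters (value * freq[lett]) instead of A's rescan of value_letters per letter.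

-- ===== PORT A =====
-- for codigo in grupos: cont = 0; for letter in codigo: for value, lett in value_letters:
--   if letter == lett: cont += value; cont_groups.append(cont)
def conversion_grupos (grupos : List String) (value_letters : List (Int × String)) : List Int :=
  grupos.foldl
    (fun cont_groups codigo =>
      cont_groups ++
        [codigo.toList.foldl
          (fun cont letter =>
            value_letters.foldl
              (fun cont p => if String.singleton letter = p.2 then cont + p.1 else cont)
              cont)
          0])
    []

-- ===== PORT B =====
-- freq = {}; for ch in codigo: freq[ch] = freq.get(ch, 0) + 1
-- append(sum(value * freq.get(lett, 0) for value, lett in value_letters))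
def conversion_grupos_alt (grupos : List String) (value_letters : List (Int × String)) : List Int :=
  grupos.foldl
    (fun cont_groups codigo =>
      let freq : PySem.Dict String Int :=
        codigo.toList.foldl
          (fun d ch => d.insert (String.singleton ch) (d.getD (String.singleton ch) 0 + 1))
          PySem.Dict.empty
      cont_groups ++ [(value_letters.map (fun p => p.1 * freq.getD p.2 0)).sum])
    []

-- ===== PRECONDITION & SPEC =====
def Spec_conversion_grupos (grupos : List String) (value_letters : List (Int × String)) (out : List Int) : Prop := out = conversion_grupos_alt grupos value_letters
instance (grupos : List String) (value_letters : List (Int × String)) (out : List Int) : Decidable (Spec_conversion_grupos grupos value_letters out) := by unfold Spec_conversion_grupos; infer_instance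

-- ===== CLAIM (what is proved, stated in full; the proofs are below) =====
def Claim_equal_conversion_grupos : Prop := ∀ (grupos : List String) (value_letters : List (Int × String)), Dom_conversion_grupos grupos value_letters → Spec_conversion_grupos grupos value_letters (conversion_grupos grupos value_letters)

-- ===== LEMMAS AND PROOFS =====

-- A's inner value_letters scan for one letter, as a sum.
theorem pv_inner_scan (letter : Char) (vl : List (Int × String)) (c : Int) :
    vl.foldl (fun cont p => if String.singleton letter = p.2 then cont + p.1 else cont) c
      = c + (vl.map (fun p => if String.singleton letter = p.2 then p.1 else 0)).sum := by
  induction vl generalizing c with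
  | nil => simp
  | cons q t ih => simp only [List.foldl_cons, List.map_cons, List.sum_cons, ih]; split_ifs <;> ring

-- pointwise sum splits
theorem pv_map_sum_add {α : Type} (l : List α) (f g : α → Int) :
    (l.map f).sum + (l.map g).sum = (l.map (fun x => f x + g x)).sum := by
  induction l with
  | nil => simp
  | cons a t ih => simp only [List.map_cons, List.sum_cons, ← ih]; ring

-- exchange of the two summations
theorem pv_sum_swap (cs : List Char) (vl : List (Int × String)) (F : Char → Int × String → Int) :
    (cs.map (fun letter => (vl.map (F letter)).sum)).sum
      = (vl.map (fun p => (cs.map (fun letter => F letter p)).sum)).sum := by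
  induction cs with
  | nil => simp
  | cons a t ih =>
      simp only [List.map_cons, List.sum_cons, ih, pv_map_sum_add]

-- the sum of matched values over a group equals value times frequency
theorem pv_count_mul (cs : List Char) (p : Int × String) :
    (cs.map (fun letter => if String.singleton letter = p.2 then p.1 else 0)).sum
      = p.1 * ((cs.map String.singleton).count p.2 : Int) := by
  induction cs with
  | nil => simp
  | cons a t ih =>
      simp only [List.map_cons, List.sum_cons, ih, List.count_cons]
      by_cases h : String.singleton a = p.2
      · simp only [h, beq_self_eq_true, if_true]; push_cast; ring
      · have h2 : (p.2 == String.singleton a) = false := by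
          simp only [beq_eq_false_iff_ne, ne_eq]
          exact fun hh => h hh.symm
        have h3 : (String.singleton a == p.2) = false := by
          simp only [beq_eq_false_iff_ne, ne_eq]; exact h
        simp only [if_neg h, h2, h3, if_false]
        push_cast
        ring

-- per-group equality of A's nested scans and B's frequency-table pass
theorem pv_group_eq (cs : List Char) (vl : List (Int × String)) :
    cs.foldl
        (fun cont letter =>
          vl.foldl (fun cont p => if String.singleton letter = p.2 then cont + p.1 else cont) cont)
        0
      = (vl.map (fun p =>
          p.1 * (cs.foldl
              (fun d ch => d.insert (String.singleton ch) (d.getD (String.singleton ch) 0 + 1))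
              PySem.Dict.empty).getD p.2 0)).sum := by
  have hfreq : ∀ p : Int × String,
      (cs.foldl (fun d ch => d.insert (String.singleton ch) (d.getD (String.singleton ch) 0 + 1))
          PySem.Dict.empty).getD p.2 0
        = ((cs.map String.singleton).count p.2 : Int) := by
    intro p
    have key : ((cs.map String.singleton).foldl (fun d x => d.insert x (d.getD x 0 + 1))
        PySem.Dict.empty).getD p.2 0 = ((cs.map String.singleton).count p.2 : Int) := by
      rw [PySem.Dict.foldl_insert_getD_add_one_eq_counter, PySem.Dict.getD_counter]
    rw [List.foldl_map] at key
    exact key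
  calc cs.foldl (fun cont letter =>
          vl.foldl (fun cont p => if String.singleton letter = p.2 then cont + p.1 else cont) cont) 0
      = (cs.map (fun letter =>
          (vl.map (fun p => if String.singleton letter = p.2 then p.1 else 0)).sum)).sum := by
        rw [show (fun cont letter =>
              vl.foldl (fun cont p => if String.singleton letter = p.2 then cont + p.1 else cont) cont)
            = (fun cont letter => cont +
              (vl.map (fun p => if String.singleton letter = p.2 then p.1 else 0)).sum) from
            funext fun c => funext fun letter => pv_inner_scan letter vl c]
        rw [PySem.List.foldl_add]; simp
    _ = (vl.map (fun p =>
          (cs.map (fun letter => if String.singleton letter = p.2 then p.1 else 0)).sum)).sum :=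
        pv_sum_swap cs vl _
    _ = _ := by
        refine congrArg List.sum (List.map_congr_left fun p _ => ?_)
        rw [pv_count_mul, hfreq]

-- ===== VERDICT (by name: the statement is the Claim_ definition above) =====
theorem conversion_grupos_spec : Claim_equal_conversion_grupos := by
  intro grupos value_letters _
  unfold Spec_conversion_grupos conversion_grupos conversion_grupos_alt
  rw [PySem.List.foldl_append_singleton_eq_map, PySem.List.foldl_append_singleton_eq_map]
  refine congrArg _ (List.map_congr_left fun codigo _ => ?_)
  exact pv_group_eq codigo.toList value_letters
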